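-- pv_equiv track=rewrite | github.com/VCNPRO/verbadoc-pruebas | lib/fundae_opencv_validator.py | _map_group_of_4
-- ===== SOURCE A (Python) =====
-- def _map_group_of_4(row_cbs, densities, mark_idx, mid_x, is_first_half) -> str:
--     """Mapea marca dentro de un grupo de 4 (1,2,3,4 sin NC)."""
--     if is_first_half:
--         group = [(i, cb) for i, cb in enumerate(row_cbs) if cb['x'] < mid_x]
--     else:
--         group = [(i, cb) for i, cb in enumerate(row_cbs) if cb['x'] >= mid_x]
--     # Marca + 3 vacías con menor densidad del grupo
--     others = sorted([(i, cb) for i, cb in group if i != mark_idx], key=lambda x: densities[x[0]])[:3]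
--     four = [(mark_idx, row_cbs[mark_idx])] + [(i, cb) for i, cb in others]
--     four.sort(key=lambda x: x[1]['x'])
--     mark_pos = next(i for i, (idx, _) in enumerate(four) if idx == mark_idx)
--     value = ["1", "2", "3", "4"][mark_pos] if mark_pos < 4 else "4"
--     return value
-- ===== SOURCE B (Python) =====
-- def _map_group_of_4(row_cbs, densities, mark_idx, mid_x, is_first_half) -> str:
--     """Single pass over the row: maintain a bounded buffer of the 3 lowest-density
--     empty checkboxes of the group (stable insertion, so ties keep original order,
--     exactly like sorted(...)[:3]); the mark's position is 1 + how many of them lie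
--     strictly left of the mark (strict '<' matches the stable sort's tie-breaking)."""
--     mark_x = row_cbs[mark_idx]['x']
--     top = []  # at most 3 indices, kept in ascending density, stable
--     for i, cb in enumerate(row_cbs):
--         if i == mark_idx:
--             continue
--         if (cb['x'] < mid_x) if is_first_half else (cb['x'] >= mid_x):
--             j = 0
--             while j < len(top) and densities[top[j]] <= densities[i]:
--                 j += 1
--             top.insert(j, i)
--             del top[3:]
--     pos = sum(1 for i in top if row_cbs[i]['x'] < mark_x)
--     return str(pos + 1)
-- ===== Notes on version B (the rewrite author's own statement) =====
-- stated objective: alternative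
-- what changed: Instead of filtering the group, fully sorting it by density, taking 3, building a 4-list, re-sorting it by x and searching for the mark, B makes a single pass over the row maintaining a bounded stable buffer of the 3 lowest-density others and returns 1 plus the number of them strictly left of the mark.
import Mathlib
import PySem

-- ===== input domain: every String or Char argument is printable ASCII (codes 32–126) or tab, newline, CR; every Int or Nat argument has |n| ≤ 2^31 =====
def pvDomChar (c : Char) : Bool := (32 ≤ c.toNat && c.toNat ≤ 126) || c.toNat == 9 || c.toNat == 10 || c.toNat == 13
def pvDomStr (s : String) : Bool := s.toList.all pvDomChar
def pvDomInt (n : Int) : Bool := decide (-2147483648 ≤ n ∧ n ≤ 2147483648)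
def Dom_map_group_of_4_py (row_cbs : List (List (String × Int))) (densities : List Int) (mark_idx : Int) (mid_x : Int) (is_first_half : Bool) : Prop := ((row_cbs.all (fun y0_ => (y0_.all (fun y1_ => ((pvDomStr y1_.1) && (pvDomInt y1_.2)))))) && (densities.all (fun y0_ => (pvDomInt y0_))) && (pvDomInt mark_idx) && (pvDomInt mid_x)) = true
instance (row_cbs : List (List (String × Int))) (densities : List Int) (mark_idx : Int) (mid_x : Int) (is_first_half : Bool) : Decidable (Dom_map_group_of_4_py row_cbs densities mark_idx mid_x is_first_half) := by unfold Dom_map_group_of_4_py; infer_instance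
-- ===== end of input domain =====

-- B replaces A's filter + full density sort + take 3 + second sort + index search by a
-- single pass with a bounded 3-element stable buffer and a strict-< count (alternative
-- decomposition; return value only, neither program mutates its arguments).
-- ===== PORT A =====
-- cb['x'] for a dict modelled as an association list: first match; the default 0 is
-- never used under Pre_ (every checkbox dict contains key "x" there).
def pvX (cb : List (String × Int)) : Int := (cb.lookup "x").getD 0

def map_group_of_4_py (row_cbs : List (List (String × Int))) (densities : List Int) (mark_idx : Int) (mid_x : Int) (is_first_half : Bool) : String :=
  let group : List (Int × List (String × Int)) :=
    if is_first_half then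
      (PySem.List.enumerate row_cbs).filter (fun p => decide (pvX p.2 < mid_x))
    else
      (PySem.List.enumerate row_cbs).filter (fun p => decide (mid_x ≤ pvX p.2))
  -- densities[x[0]] via pyGetD: exact under Pre_ (all group indices are inside densities)
  let others := (PySem.List.sorted (group.filter (fun p => p.1 != mark_idx))
      (fun x => PySem.List.pyGetD densities x.1 0)).take 3
  -- row_cbs[mark_idx] via pyGetD: exact under Pre_ (mark_idx a valid Python index)
  let four := (mark_idx, PySem.List.pyGetD row_cbs mark_idx []) :: others
  let sorted4 := PySem.List.sorted four (fun x => pvX x.2)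
  -- next(i for i, (idx, _) in enumerate(four) if idx == mark_idx): first matching index;
  -- the generator always finds one (the mark itself is in four), so findIdx is exact
  let mark_pos := sorted4.findIdx (fun q => q.1 == mark_idx)
  if mark_pos < 4 then PySem.List.pyGetD ["1", "2", "3", "4"] (mark_pos : Int) "" else "4"

-- ===== PORT B =====
-- Source B's while-loop-and-insert: stable insertion of i after all buffered j with
-- densities[j] <= densities[i] (exact: the while loop finds that split point)
def pvInsTop (densities : List Int) (i : Int) : List Int → List Int
  | [] => [i]
  | j :: rest =>
      if PySem.List.pyGetD densities j 0 ≤ PySem.List.pyGetD densities i 0 then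
        j :: pvInsTop densities i rest
      else i :: j :: rest

def map_group_of_4_py_alt (row_cbs : List (List (String × Int))) (densities : List Int) (mark_idx : Int) (mid_x : Int) (is_first_half : Bool) : String :=
  let mark_x := pvX (PySem.List.pyGetD row_cbs mark_idx [])
  -- the single pass: continue on the mark and on out-of-group boxes, else insert and
  -- truncate the buffer to 3 (del top[3:])
  let top := (PySem.List.enumerate row_cbs).foldl
    (fun top p =>
      if p.1 == mark_idx then top
      else if (if is_first_half then decide (pvX p.2 < mid_x) else decide (mid_x ≤ pvX p.2)) then
        (pvInsTop densities p.1 top).take 3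
      else top) []
  let pos := (top.filter (fun i => decide (pvX (PySem.List.pyGetD row_cbs i []) < mark_x))).length
  PySem.Int.toStr ((pos : Int) + 1)

-- ===== PRECONDITION & SPEC =====
-- Pre_ excludes exactly the inputs where the Python raises: mark_idx not a valid index of
-- row_cbs (IndexError), a checkbox dict without key 'x' (KeyError), or a group index other
-- than the mark that is out of range of densities (IndexError in the sort key).
def Pre_map_group_of_4_py (row_cbs : List (List (String × Int))) (densities : List Int) (mark_idx : Int) (mid_x : Int) (is_first_half : Bool) : Prop :=
  PySem.Raise.InRange row_cbs.length mark_idx ∧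
  (∀ cb ∈ row_cbs, (cb.lookup "x").isSome = true) ∧
  (∀ p ∈ PySem.List.enumerate row_cbs,
    ((if is_first_half then pvX p.2 < mid_x else mid_x ≤ pvX p.2) ∧ p.1 ≠ mark_idx) →
      p.1 < (densities.length : Int))
instance (row_cbs : List (List (String × Int))) (densities : List Int) (mark_idx : Int) (mid_x : Int) (is_first_half : Bool) : Decidable (Pre_map_group_of_4_py row_cbs densities mark_idx mid_x is_first_half) := by unfold Pre_map_group_of_4_py; infer_instance

def pvWitness_map_group_of_4_py : (List (List (String × Int))) × List Int × Int × Int × Bool :=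
  ([[("x", 0)], [("x", 5)], [("x", 2)], [("x", 7)], [("x", 3)]], [1, 2, 3, 4, 5], 1, 10, true)

def Spec_map_group_of_4_py (row_cbs : List (List (String × Int))) (densities : List Int) (mark_idx : Int) (mid_x : Int) (is_first_half : Bool) (out : String) : Prop := out = map_group_of_4_py_alt row_cbs densities mark_idx mid_x is_first_half
instance (row_cbs : List (List (String × Int))) (densities : List Int) (mark_idx : Int) (mid_x : Int) (is_first_half : Bool) (out : String) : Decidable (Spec_map_group_of_4_py row_cbs densities mark_idx mid_x is_first_half out) := by unfold Spec_map_group_of_4_py; infer_instance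

-- ===== CLAIM (what is proved, stated in full; the proofs are below) =====
def Claim_equal_map_group_of_4_py : Prop := ∀ (row_cbs : List (List (String × Int))) (densities : List Int) (mark_idx : Int) (mid_x : Int) (is_first_half : Bool), Dom_map_group_of_4_py row_cbs densities mark_idx mid_x is_first_half → Pre_map_group_of_4_py row_cbs densities mark_idx mid_x is_first_half → Spec_map_group_of_4_py row_cbs densities mark_idx mid_x is_first_half (map_group_of_4_py row_cbs densities mark_idx mid_x is_first_half)

-- ===== LEMMAS AND PROOFS =====

theorem pvWitness_ok :
    Dom_map_group_of_4_py (pvWitness_map_group_of_4_py.1) (pvWitness_map_group_of_4_py.2.1) (pvWitness_map_group_of_4_py.2.2.1) (pvWitness_map_group_of_4_py.2.2.2.1) (pvWitness_map_group_of_4_py.2.2.2.2) ∧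
    Pre_map_group_of_4_py (pvWitness_map_group_of_4_py.1) (pvWitness_map_group_of_4_py.2.1) (pvWitness_map_group_of_4_py.2.2.1) (pvWitness_map_group_of_4_py.2.2.2.1) (pvWitness_map_group_of_4_py.2.2.2.2) := by
  constructor <;> decide

-- One insertion step preserves the shape pre ++ m :: suf, with every element of pre
-- strictly below m in key and rejected by pm; pre grows iff the new element is below m.
theorem pvInsertBy_split {α : Type} (key : α → Int) (pm : α → Bool) (m o : α)
    (pre suf : List α)
    (hpre : ∀ p ∈ pre, key p < key m ∧ pm p = false) (ho : pm o = false) :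
    ∃ pre' suf',
      PySem.List.insertBy (fun a b => decide (key a < key b)) o (pre ++ m :: suf)
        = pre' ++ m :: suf' ∧
      (∀ p ∈ pre', key p < key m ∧ pm p = false) ∧
      pre'.length = pre.length + (if key o < key m then 1 else 0) := by
  induction pre with
  | nil =>
      by_cases h : key o < key m
      · exact ⟨[o], suf, by simp [PySem.List.insertBy, h], by simp [h, ho], by simp [h]⟩
      · refine ⟨[], PySem.List.insertBy (fun a b => decide (key a < key b)) o suf, ?_, by simp, by simp [h]⟩
        simp [PySem.List.insertBy, h]
  | cons y pre ih =>
      have hy := hpre y (by simp)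
      by_cases h : key o < key y
      · have hom : key o < key m := lt_trans h hy.1
        refine ⟨o :: y :: pre, suf, ?_, ?_, by simp [hom]⟩
        · simp [PySem.List.insertBy, h]
        · intro p hp
          rcases List.mem_cons.1 hp with rfl | hp
          · exact ⟨hom, ho⟩
          · exact hpre p hp
      · obtain ⟨pre', suf', heq, hpre', hlen⟩ :=
          ih (fun p hp => hpre p (by simp [hp]))
        refine ⟨y :: pre', suf', ?_, ?_, by simp [hlen]; omega⟩
        · simp [PySem.List.insertBy, h, heq]
        · intro p hp
          rcases List.mem_cons.1 hp with rfl | hp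
          · exact hy
          · exact hpre' p hp

-- Folding insertions over os keeps the shape; pre grows by the number of os strictly below m.
theorem pvFoldl_insertBy_split {α : Type} (key : α → Int) (pm : α → Bool) (m : α)
    (os : List α) (pre suf : List α)
    (hpre : ∀ p ∈ pre, key p < key m ∧ pm p = false)
    (hos : ∀ o ∈ os, pm o = false) :
    ∃ pre' suf',
      os.foldl (fun acc x => PySem.List.insertBy (fun a b => decide (key a < key b)) x acc)
          (pre ++ m :: suf)
        = pre' ++ m :: suf' ∧
      (∀ p ∈ pre', key p < key m ∧ pm p = false) ∧
      pre'.length = pre.length + os.countP (fun o => decide (key o < key m)) := by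
  induction os generalizing pre suf with
  | nil => exact ⟨pre, suf, by simp, hpre, by simp⟩
  | cons o os ih =>
      obtain ⟨pre₁, suf₁, heq₁, hpre₁, hlen₁⟩ :=
        pvInsertBy_split key pm m o pre suf hpre (hos o (by simp))
      obtain ⟨pre', suf', heq, hpre', hlen⟩ :=
        ih pre₁ suf₁ hpre₁ (fun x hx => hos x (by simp [hx]))
      refine ⟨pre', suf', ?_, hpre', ?_⟩
      · simpa [List.foldl_cons, heq₁] using heq
      · rw [hlen, hlen₁, List.countP_cons]
        by_cases h : key o < key m <;> simp [h] <;> omega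

theorem pvFindIdx_append_cons {α : Type} (pm : α → Bool) (m : α) (pre suf : List α)
    (hpre : ∀ p ∈ pre, pm p = false) (hm : pm m = true) :
    (pre ++ m :: suf).findIdx pm = pre.length := by
  induction pre with
  | nil => simp [List.findIdx_cons, hm]
  | cons y pre ih =>
      simp [List.findIdx_cons, hpre y (by simp), ih (fun p hp => hpre p (by simp [hp]))]

-- The first pm-element of the stable sort of m :: os (pm true exactly at m) sits after
-- exactly the os that are strictly below m in key.
theorem pvFindIdx_sorted_cons {α : Type} (key : α → Int) (pm : α → Bool) (m : α)
    (os : List α) (hm : pm m = true) (hos : ∀ o ∈ os, pm o = false) :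
    (PySem.List.sorted (m :: os) key false).findIdx pm
      = os.countP (fun o => decide (key o < key m)) := by
  rw [PySem.List.sorted_eq_foldl_insertBy]
  obtain ⟨pre', suf', heq, hpre', hlen⟩ :=
    pvFoldl_insertBy_split key pm m os [] [] (by simp) hos
  have h0 : (m :: os).foldl
      (fun acc x => PySem.List.insertBy (fun a b => decide (key a < key b)) x acc) []
      = os.foldl (fun acc x => PySem.List.insertBy (fun a b => decide (key a < key b)) x acc)
          (([] : List α) ++ m :: []) := by
    simp [List.foldl_cons, PySem.List.insertBy]
  rw [h0, heq, pvFindIdx_append_cons pm m pre' suf' (fun p hp => (hpre' p hp).2) hm]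
  simpa using hlen

-- insertBy with a key read through f commutes with mapping f.
theorem pvInsertBy_map {α β : Type} (f : α → β) (key : β → Int) (x : α) (ys : List α) :
    (PySem.List.insertBy (fun a b => decide (key (f a) < key (f b))) x ys).map f
      = PySem.List.insertBy (fun a b => decide (key a < key b)) (f x) (ys.map f) := by
  induction ys with
  | nil => simp [PySem.List.insertBy]
  | cons y ys ih =>
      simp only [PySem.List.insertBy, List.map_cons]
      by_cases h : key (f x) < key (f y) <;> simp [h, ih]

theorem pvFoldl_insertBy_map {α β : Type} (f : α → β) (key : β → Int) (xs : List α) (acc : List α) :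
    (xs.foldl (fun acc x => PySem.List.insertBy (fun a b => decide (key (f a) < key (f b))) x acc) acc).map f
      = (xs.map f).foldl (fun acc x => PySem.List.insertBy (fun a b => decide (key a < key b)) x acc) (acc.map f) := by
  induction xs generalizing acc with
  | nil => simp
  | cons x xs ih => simp [List.foldl_cons, ih, pvInsertBy_map]

-- sorted with a key that factors through f commutes with mapping f.
theorem pvSorted_map {α β : Type} (f : α → β) (key : β → Int) (xs : List α) :
    (PySem.List.sorted xs (fun a => key (f a)) false).map f
      = PySem.List.sorted (xs.map f) key false := by
  rw [PySem.List.sorted_eq_foldl_insertBy, PySem.List.sorted_eq_foldl_insertBy]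
  simpa using pvFoldl_insertBy_map f key xs []

theorem pvSorted_map_fst (densities : List Int) (xs : List (Int × List (String × Int))) :
    (PySem.List.sorted xs (fun x => PySem.List.pyGetD densities x.1 0) false).map (·.1)
      = PySem.List.sorted (xs.map (·.1)) (fun i => PySem.List.pyGetD densities i 0) false := by
  exact pvSorted_map (fun p => p.1) (fun i => PySem.List.pyGetD densities i 0) xs

theorem pvFilter_map {α β : Type} (f : α → β) (q : β → Bool) (l : List α) :
    (l.map f).filter q = (l.filter (fun a => q (f a))).map f := by
  induction l with
  | nil => rfl
  | cons x l ih => by_cases h : q (f x) <;> simp [h, ih]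

theorem pvMem_enum_getD (row_cbs : List (List (String × Int)))
    (o : Int × List (String × Int)) (ho : o ∈ PySem.List.enumerate row_cbs) :
    PySem.List.pyGetD row_cbs o.1 [] = o.2 := by
  rw [PySem.List.mem_enumerate_iff] at ho
  obtain ⟨k, hk, rfl⟩ := ho
  simp [hk]

theorem pvCountP_congr {α : Type} (p q : α → Bool) (l : List α)
    (h : ∀ a ∈ l, p a = q a) : l.countP p = l.countP q := by
  induction l with
  | nil => rfl
  | cons x l ih =>
      rw [List.countP_cons, List.countP_cons, h x (by simp),
        ih (fun a ha => h a (by simp [ha]))]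

-- Core A-side characterisation: A's mark position (stable sort + first-index search)
-- equals the strict-< count over the first 3 of the density-sorted group indices.
theorem pvPos_eq (row_cbs : List (List (String × Int))) (densities : List Int)
    (mark_idx : Int) (g : Int × List (String × Int) → Bool) :
    (PySem.List.sorted
        ((mark_idx, PySem.List.pyGetD row_cbs mark_idx []) ::
          (PySem.List.sorted
              (((PySem.List.enumerate row_cbs).filter g).filter (fun p => p.1 != mark_idx))
              (fun x => PySem.List.pyGetD densities x.1 0)).take 3)
        (fun x => pvX x.2)).findIdx (fun q => q.1 == mark_idx)
      = (((PySem.List.sorted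
            (((PySem.List.enumerate row_cbs).filter (fun p => g p && (p.1 != mark_idx))).map (·.1))
            (fun i => PySem.List.pyGetD densities i 0)).take 3).filter
          (fun i => decide (pvX (PySem.List.pyGetD row_cbs i []) <
              pvX (PySem.List.pyGetD row_cbs mark_idx [])))).length := by
  have hff : (PySem.List.enumerate row_cbs).filter (fun p => g p && (p.1 != mark_idx))
      = ((PySem.List.enumerate row_cbs).filter g).filter (fun p => p.1 != mark_idx) := by
    rw [List.filter_filter]
    exact List.filter_congr (fun a _ => by rw [Bool.and_comm])
  set filtered := ((PySem.List.enumerate row_cbs).filter g).filter (fun p => p.1 != mark_idx) with hfiltered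
  set others := (PySem.List.sorted filtered (fun x => PySem.List.pyGetD densities x.1 0)).take 3 with hothers
  have hmem : ∀ o ∈ others, o ∈ filtered := by
    intro o ho
    exact (PySem.List.mem_sorted _ _ _ _).1 (List.mem_of_mem_take ho)
  have hos : ∀ o ∈ others, (o.1 == mark_idx) = false := by
    intro o ho
    have := (List.mem_filter.1 (hmem o ho)).2
    simpa using this
  rw [pvFindIdx_sorted_cons (fun x => pvX x.2) (fun q => q.1 == mark_idx) _ others (by simp) hos]
  rw [hff, ← pvSorted_map_fst, ← List.map_take, ← hothers, pvFilter_map, List.length_map,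
    ← List.countP_eq_length_filter]
  refine pvCountP_congr _ _ _ (fun o ho => ?_)
  have henum : o ∈ PySem.List.enumerate row_cbs :=
    (List.mem_filter.1 ((List.mem_filter.1 (hmem o ho)).1)).1
  rw [pvMem_enum_getD row_cbs o henum]

-- B-side: the hand-written stable insert is insertBy with the density key.
theorem pvInsTop_eq (d : List Int) (i : Int) (l : List Int) :
    pvInsTop d i l = PySem.List.insertBy
      (fun a b => decide (PySem.List.pyGetD d a 0 < PySem.List.pyGetD d b 0)) i l := by
  induction l with
  | nil => simp [pvInsTop, PySem.List.insertBy]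
  | cons j rest ih =>
      simp only [pvInsTop, PySem.List.insertBy, ih]
      by_cases h : PySem.List.pyGetD d j 0 ≤ PySem.List.pyGetD d i 0
      · simp [h, not_lt.2 h]
      · simp [h, lt_of_not_ge h]

-- Truncation commutes with one insertion: the first n elements after inserting into l
-- depend only on the first n elements of l.
theorem pvTake_cons_take {α : Type} (n : Nat) (y : α) (ys : List α) :
    (y :: ys.take n).take n = (y :: ys).take n := by
  cases n with
  | zero => simp
  | succ m =>
      simp only [List.take_succ_cons, List.take_take]
      rw [Nat.min_eq_left (Nat.le_succ m)]

theorem pvInsertBy_take {α : Type} (lt : α → α → Bool) (x : α) (n : Nat) (l : List α) :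
    (PySem.List.insertBy lt x (l.take n)).take n = (PySem.List.insertBy lt x l).take n := by
  induction l generalizing n with
  | nil => simp
  | cons y ys ih =>
      cases n with
      | zero => simp
      | succ n =>
          simp only [List.take_succ_cons, PySem.List.insertBy]
          by_cases h : lt x y = true
          · simp [h, pvTake_cons_take]
          · simp [h, List.take_succ_cons, ih]

-- Hence folding truncated insertions equals truncating the full insertion sort.
theorem pvFoldl_insertBy_take {α : Type} (lt : α → α → Bool) (n : Nat) (xs : List α)
    (acc : List α) :
    xs.foldl (fun acc x => (PySem.List.insertBy lt x acc).take n) (acc.take n)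
      = (xs.foldl (fun acc x => PySem.List.insertBy lt x acc) acc).take n := by
  induction xs generalizing acc with
  | nil => simp
  | cons x xs ih =>
      simp only [List.foldl_cons]
      rw [pvInsertBy_take, ← List.foldl_cons]
      simpa using ih (PySem.List.insertBy lt x acc)

-- A fold that skips the elements failing cond is a fold over the filtered projections.
theorem pvFoldl_filterMap {α β γ : Type} (cond : α → Bool) (f : α → β)
    (g : γ → β → γ) (xs : List α) (acc : γ) :
    xs.foldl (fun acc p => if cond p then g acc (f p) else acc) acc
      = ((xs.filter cond).map f).foldl g acc := by
  induction xs generalizing acc with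
  | nil => rfl
  | cons x xs ih => by_cases h : cond x <;> simp [h, ih]

theorem pvFinal (n : Nat) (h : n ≤ 3) :
    (if n < 4 then PySem.List.pyGetD ["1", "2", "3", "4"] (n : Int) "" else "4")
      = PySem.Int.toStr ((n : Int) + 1) := by
  interval_cases n <;> decide

-- B's buffer equals the first 3 of the density-sorted group indices.
theorem pvTop_eq (row_cbs : List (List (String × Int))) (densities : List Int)
    (mark_idx : Int) (g : Int × List (String × Int) → Bool) :
    (PySem.List.enumerate row_cbs).foldl
      (fun top p =>
        if p.1 == mark_idx then top
        else if g p then (pvInsTop densities p.1 top).take 3 else top) []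
      = (PySem.List.sorted
          (((PySem.List.enumerate row_cbs).filter (fun p => g p && (p.1 != mark_idx))).map (·.1))
          (fun i => PySem.List.pyGetD densities i 0)).take 3 := by
  have hbody : (fun (top : List Int) (p : Int × List (String × Int)) =>
        if p.1 == mark_idx then top
        else if g p then (pvInsTop densities p.1 top).take 3 else top)
      = fun top p => if g p && (p.1 != mark_idx) then
          (PySem.List.insertBy (fun a b => decide (PySem.List.pyGetD densities a 0 <
            PySem.List.pyGetD densities b 0)) p.1 top).take 3 else top := by
    funext top p
    rw [pvInsTop_eq]
    by_cases h1 : p.1 == mark_idx <;> by_cases h2 : g p <;> simp [h1, h2, bne]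
  rw [hbody, PySem.List.sorted_eq_foldl_insertBy, ← pvFoldl_insertBy_take]
  simpa using pvFoldl_filterMap (fun p : Int × List (String × Int) => g p && (p.1 != mark_idx))
    (fun p => p.1)
    (fun acc i => (PySem.List.insertBy (fun a b => decide (PySem.List.pyGetD densities a 0 <
      PySem.List.pyGetD densities b 0)) i acc).take 3)
    (PySem.List.enumerate row_cbs) []

-- ===== VERDICT (by name: the statement is the Claim_ definition above) =====
theorem map_group_of_4_py_spec : Claim_equal_map_group_of_4_py := by
  intro row_cbs densities mark_idx mid_x is_first_half _ _
  unfold Spec_map_group_of_4_py map_group_of_4_py map_group_of_4_py_alt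
  cases is_first_half <;> simp only [Bool.false_eq_true, if_false, if_true]
  · rw [pvTop_eq row_cbs densities mark_idx (fun p => decide (mid_x ≤ pvX p.2)),
      pvPos_eq row_cbs densities mark_idx (fun p => decide (mid_x ≤ pvX p.2))]
    exact pvFinal _ (le_trans (List.length_filter_le _ _)
      (by simpa using List.length_take_le 3 _))
  · rw [pvTop_eq row_cbs densities mark_idx (fun p => decide (pvX p.2 < mid_x)),
      pvPos_eq row_cbs densities mark_idx (fun p => decide (pvX p.2 < mid_x))]
    exact pvFinal _ (le_trans (List.length_filter_le _ _)
      (by simpa using List.length_take_le 3 _))
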